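-- pv_equiv track=rewrite | github.com/Ryaaad/Sequence_Alignment | Method_iterative_genitic.py | evaluation_func
-- ===== SOURCE A (Python) =====
-- def Levenshtein(seq1,seq2):
--     Matrix=[[0]*(len(seq2)+2) for _ in range(len(seq1) + 2)]
--     Matrix[0][0]='*'
--     Matrix[1][0]='|'
--     Matrix[0][1]='__'
--     for i in range(2,len(Matrix)):
--      Matrix[i][0]=seq1[i-2]
--     for i in range(2,len(Matrix[0])):
--      Matrix[0][i]=seq2[i-2]
--
--     for i in range(2,len(Matrix)):
--      Matrix[i][1]=Matrix[i-1][1]+1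
--     for i in range(2,len(Matrix[0])):
--      Matrix[1][i]=Matrix[1][i-1]+1
--     for i in range(2,len(Matrix)):
--       for j in range(2,len(Matrix[0])):
--         cout=0
--         if(Matrix[i][0]==Matrix[0][j]):
--            cout=0
--         else :
--           cout=1
--         Matrix[i][j]=min(Matrix[i-1][j-1]+cout,Matrix[i][j-1]+1,Matrix[i-1][j]+1)
--     return Matrix
--
-- def evaluation_func(lines):
--     for i in range(len(lines)):
--         sum_score = 0
--         for j in range(len(lines)):
--             if i != j:
--                 Matrix = Levenshtein(lines[i], lines[j])
--                 scr= Matrix[len(Matrix)-1][len(Matrix[0])-1]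
--                 sum_score += scr
--
--         return sum_score * - 1
-- ===== SOURCE B (Python) =====
-- def evaluation_func(lines):
--     # empty input: mirror the original's behaviour of returning None
--     if not lines:
--         return None
--
--     def editdist(a, b):
--         # top-down memoized edit distance between prefixes a[:i] and b[:j]
--         memo = {}
--
--         def go(i, j):
--             if (i, j) in memo:
--                 return memo[(i, j)]
--             if i == 0:
--                 r = j
--             elif j == 0:
--                 r = i
--             else:
--                 c = 0 if a[i - 1] == b[j - 1] else 1
--                 r = min(go(i - 1, j - 1) + c, go(i - 1, j) + 1, go(i, j - 1) + 1)
--             memo[(i, j)] = r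
--             return r
--
--         return go(len(a), len(b))
--
--     return -sum(editdist(lines[0], b) for b in lines[1:])
-- ===== Notes on version B (the rewrite author's own statement) =====
-- stated objective: alternative
-- what changed: Replaces the bottom-up full-matrix Levenshtein (with decorative header rows/sentinel cells) by a top-down memoized recursion on prefix indices, summing distances from the first line with a generator instead of an index loop with an i!=j guard.
import Mathlib
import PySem

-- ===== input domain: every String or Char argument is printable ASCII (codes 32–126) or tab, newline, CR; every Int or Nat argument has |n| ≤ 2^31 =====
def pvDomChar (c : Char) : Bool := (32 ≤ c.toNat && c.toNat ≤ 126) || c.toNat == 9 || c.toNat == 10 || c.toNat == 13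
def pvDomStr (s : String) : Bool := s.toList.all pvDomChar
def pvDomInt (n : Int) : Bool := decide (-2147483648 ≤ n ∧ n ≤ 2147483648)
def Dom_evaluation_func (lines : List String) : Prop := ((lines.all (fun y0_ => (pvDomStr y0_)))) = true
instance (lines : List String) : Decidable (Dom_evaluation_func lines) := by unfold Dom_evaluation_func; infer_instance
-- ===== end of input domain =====

-- B replaces A's bottom-up full-matrix Levenshtein (header rows, sentinel string cells, nested
-- index loops) by a top-down memoized recursion on prefix indices; same values, alternative algorithm.


-- ===== PORT A =====
-- matrix cells hold either an int or a string (Python's heterogeneous list entries)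
inductive Cell
  | int : Int → Cell
  | str : String → Cell
deriving DecidableEq, Repr

def cInt : Cell → Int
  | .int n => n
  | .str _ => 0   -- never reached: every cell read arithmetically is an int

def mget (M : List (List Cell)) (i j : Nat) : Cell := (M.getD i []).getD j (.int 0)

def mset (M : List (List Cell)) (i j : Nat) (v : Cell) : List (List Cell) :=
  M.set i ((M.getD i []).set j v)

def Levenshtein (seq1 seq2 : String) : List (List Cell) :=
  let s := seq1.toList
  let t := seq2.toList
  let M0 : List (List Cell) :=
    List.replicate (s.length + 2) (List.replicate (t.length + 2) (Cell.int 0))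
  let M1 := mset M0 0 0 (.str "*")
  let M2 := mset M1 1 0 (.str "|")
  let M3 := mset M2 0 1 (.str "__")
  let M4 := (List.range' 2 s.length).foldl
      (fun M i => mset M i 0 (.str (String.ofList [s.getD (i - 2) ' ']))) M3
  let M5 := (List.range' 2 t.length).foldl
      (fun M j => mset M 0 j (.str (String.ofList [t.getD (j - 2) ' ']))) M4
  let M6 := (List.range' 2 s.length).foldl
      (fun M i => mset M i 1 (.int (cInt (mget M (i - 1) 1) + 1))) M5
  let M7 := (List.range' 2 t.length).foldl
      (fun M j => mset M 1 j (.int (cInt (mget M 1 (j - 1)) + 1))) M6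
  (List.range' 2 s.length).foldl
    (fun M i =>
      (List.range' 2 t.length).foldl
        (fun M j =>
          let cout : Int := if mget M i 0 = mget M 0 j then 0 else 1
          mset M i j (.int (min (min (cInt (mget M (i - 1) (j - 1)) + cout)
                                     (cInt (mget M i (j - 1)) + 1))
                                (cInt (mget M (i - 1) j) + 1)))) M) M7

def evaluation_func (lines : List String) : Option Int :=
  -- the Python for-loop returns at the end of its FIRST iteration (or falls through to None)
  if lines.length = 0 then none
  else
    let sum_score := (List.range lines.length).foldl
      (fun acc j =>
        if 0 ≠ j then
          let M := Levenshtein (lines.getD 0 "") (lines.getD j "")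
          acc + cInt (mget M (M.length - 1) ((M.getD 0 []).length - 1))
        else acc) 0
    some (sum_score * (-1))

-- ===== PORT B =====
-- top-down memoized edit distance between prefixes a[:i] and b[:j]
def edGo (a b : List Char) (i j : Nat) (memo : PySem.Dict (Nat × Nat) Int) :
    Int × PySem.Dict (Nat × Nat) Int :=
  match memo.get? (i, j) with
  | some r => (r, memo)
  | none =>
    if i = 0 then
      let r : Int := j
      (r, memo.insert (i, j) r)
    else if j = 0 then
      let r : Int := i
      (r, memo.insert (i, j) r)
    else
      let c : Int := if a.getD (i - 1) ' ' = b.getD (j - 1) ' ' then 0 else 1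
      let p1 := edGo a b (i - 1) (j - 1) memo
      let p2 := edGo a b (i - 1) j p1.2
      let p3 := edGo a b i (j - 1) p2.2
      let r := min (min (p1.1 + c) (p2.1 + 1)) (p3.1 + 1)
      (r, p3.2.insert (i, j) r)
termination_by i + j
decreasing_by all_goals omega

def editdist (a b : String) : Int :=
  (edGo a.toList b.toList a.toList.length b.toList.length PySem.Dict.empty).1

def evaluation_func_alt (lines : List String) : Option Int :=
  match lines with
  | [] => none
  | l0 :: rest => some (-(rest.foldl (fun acc b => acc + editdist l0 b) 0))

-- ===== PRECONDITION & SPEC =====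
def Spec_evaluation_func (lines : List String) (out : Option Int) : Prop := out = evaluation_func_alt lines
instance (lines : List String) (out : Option Int) : Decidable (Spec_evaluation_func lines out) := by unfold Spec_evaluation_func; infer_instance

-- ===== CLAIM (what is proved, stated in full; the proofs are below) =====
def Claim_equal_evaluation_func : Prop := ∀ (lines : List String), Dom_evaluation_func lines → Spec_evaluation_func lines (evaluation_func lines)

-- ===== LEMMAS AND PROOFS =====
-- ===== spec: edit distance on prefix lengths =====
def edN (a b : List Char) : Nat → Nat → Int
  | 0, j => (j : Int)
  | (i+1), 0 => (i : Int) + 1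
  | (i+1), (j+1) =>
    let c : Int := if a.getD i ' ' = b.getD j ' ' then 0 else 1
    min (min (edN a b i j + c) (edN a b i (j+1) + 1)) (edN a b (i+1) j + 1)
termination_by i j => i + j

theorem edN_right_zero (a b : List Char) (k : Nat) : edN a b k 0 = (k : Int) := by
  cases k <;> simp [edN]

theorem edN_left_zero (a b : List Char) (k : Nat) : edN a b 0 k = (k : Int) := by
  simp [edN]

-- ===== B side: the memo only ever stores correct values =====
def GoodMemo (a b : List Char) (m : PySem.Dict (Nat × Nat) Int) : Prop :=
  ∀ i j r, m.get? (i, j) = some r → r = edN a b i j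

theorem goodMemo_empty (a b : List Char) : GoodMemo a b PySem.Dict.empty := by
  intro i j r h; simp [PySem.Dict.get?_empty] at h

theorem goodMemo_insert (a b : List Char) (m : PySem.Dict (Nat × Nat) Int) (i j : Nat) (r : Int)
    (hm : GoodMemo a b m) (hr : r = edN a b i j) :
    GoodMemo a b (m.insert (i, j) r) := by
  intro i' j' r' h
  rw [PySem.Dict.get?_insert] at h
  split at h
  · rename_i hk; cases h; cases Prod.mk.injEq .. ▸ hk with
    | intro h1 h2 => subst h1; subst h2; exact hr
  · exact hm _ _ _ h

theorem edGo_correct (a b : List Char) (N : Nat) :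
    ∀ i j, i + j ≤ N → ∀ m, GoodMemo a b m →
      (edGo a b i j m).1 = edN a b i j ∧ GoodMemo a b (edGo a b i j m).2 := by
  induction N with
  | zero =>
    intro i j hij m hm
    have hi : i = 0 := by omega
    have hj : j = 0 := by omega
    subst hi; subst hj
    rw [edGo]
    cases h : m.get? (0, 0) with
    | some r => exact ⟨hm 0 0 r h, hm⟩
    | none =>
      simp only [edN]
      exact ⟨rfl, goodMemo_insert a b m 0 0 0 hm (by simp [edN])⟩
  | succ N ih =>
    intro i j hij m hm
    rw [edGo]
    cases h : m.get? (i, j) with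
    | some r => exact ⟨hm i j r h, hm⟩
    | none =>
      by_cases hi : i = 0
      · subst hi
        exact ⟨by simp [edN], goodMemo_insert a b m 0 j _ hm (by simp [edN])⟩
      · by_cases hj : j = 0
        · subst hj
          simp only [if_neg hi]
          refine ⟨?_, goodMemo_insert a b m i 0 _ hm ?_⟩ <;>
            simp [edN_right_zero]
        · simp only [if_neg hi, if_neg hj]
          obtain ⟨h1, g1⟩ := ih (i-1) (j-1) (by omega) m hm
          obtain ⟨h2, g2⟩ := ih (i-1) j (by omega) _ g1
          obtain ⟨h3, g3⟩ := ih i (j-1) (by omega) _ g2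
          obtain ⟨i', rfl⟩ : ∃ i', i = i' + 1 := ⟨i - 1, by omega⟩
          obtain ⟨j', rfl⟩ : ∃ j', j = j' + 1 := ⟨j - 1, by omega⟩
          simp only [Nat.add_sub_cancel] at h1 h2 h3 ⊢
          constructor
          · rw [h1, h2, h3]; simp [edN]
          · apply goodMemo_insert a b _ _ _ _ g3
            rw [h1, h2, h3]; simp [edN]
-- ===== A side: matrix machinery =====
def Shape (M : List (List Cell)) (m n : Nat) : Prop :=
  M.length = m ∧ ∀ k, k < m → (M.getD k []).length = n

theorem getD_set_row (M : List (List Cell)) (i k : Nat) (r : List Cell) :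
    (M.set i r).getD k [] = if i = k ∧ i < M.length then r else M.getD k [] := by
  simp only [List.getD, List.getElem?_set]
  split
  · rename_i h; subst h
    by_cases h2 : i < M.length <;> simp [h2]
  · rename_i h; rw [if_neg (fun hh => h hh.1)]

theorem shape_mset (M : List (List Cell)) (m n : Nat) (i j : Nat) (v : Cell)
    (h : Shape M m n) : Shape (mset M i j v) m n := by
  obtain ⟨h1, h2⟩ := h
  refine ⟨by simp [mset, h1], ?_⟩
  intro k hk
  rw [mset, getD_set_row]
  split
  · rename_i hcase
    rw [List.length_set]
    exact h2 i (hcase.1 ▸ hk)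
  · exact h2 k hk

theorem mget_mset_self (M : List (List Cell)) (m n i j : Nat) (v : Cell)
    (h : Shape M m n) (hi : i < m) (hj : j < n) :
    mget (mset M i j v) i j = v := by
  obtain ⟨h1, h2⟩ := h
  rw [mget, mset, getD_set_row]
  rw [if_pos ⟨rfl, h1 ▸ hi⟩]
  have hlen : j < (M.getD i []).length := by rw [h2 i hi]; exact hj
  simp only [List.getD] at hlen ⊢
  simp [hlen]

theorem mget_mset_ne (M : List (List Cell)) (i j i' j' : Nat) (v : Cell)
    (h : i' ≠ i ∨ j' ≠ j) :
    mget (mset M i j v) i' j' = mget M i' j' := by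
  rw [mget, mset, getD_set_row, mget]
  split
  · rename_i hcase
    obtain ⟨rfl, hlt⟩ := hcase
    have hj : j' ≠ j := h.resolve_left (fun hh => hh rfl)
    simp only [List.getD, List.getElem?_set]
    rw [if_neg (Ne.symm hj)]
  · rfl

theorem mget_M0 (m n i j : Nat) :
    mget (List.replicate m (List.replicate n (Cell.int 0))) i j = .int 0 := by
  rw [mget]
  by_cases hi : i < m
  · rw [List.getD_replicate _ hi]
    by_cases hj : j < n
    · rw [List.getD_replicate _ hj]
    · have : (List.replicate n (Cell.int 0))[j]? = none :=
        List.getElem?_eq_none_iff.mpr (by simpa using Nat.le_of_not_lt hj)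
      simp [List.getD, this]
  · have : (List.replicate m (List.replicate n (Cell.int 0)))[i]? = none :=
      List.getElem?_eq_none_iff.mpr (by simpa using Nat.le_of_not_lt hi)
    simp [List.getD, this]

theorem shape_M0 (m n : Nat) :
    Shape (List.replicate m (List.replicate n (Cell.int 0))) m n := by
  refine ⟨by simp, fun k hk => by rw [List.getD_replicate _ hk]; simp⟩
-- ===== fold abbreviations matching Levenshtein's five loops =====
def colFold (s : List Char) (k : Nat) (M : List (List Cell)) : List (List Cell) :=
  (List.range' 2 k).foldl (fun M i => mset M i 0 (.str (String.ofList [s.getD (i - 2) ' ']))) M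

def rowFold (t : List Char) (k : Nat) (M : List (List Cell)) : List (List Cell) :=
  (List.range' 2 k).foldl (fun M j => mset M 0 j (.str (String.ofList [t.getD (j - 2) ' ']))) M

def col1Fold (k : Nat) (M : List (List Cell)) : List (List Cell) :=
  (List.range' 2 k).foldl (fun M i => mset M i 1 (.int (cInt (mget M (i - 1) 1) + 1))) M

def row1Fold (k : Nat) (M : List (List Cell)) : List (List Cell) :=
  (List.range' 2 k).foldl (fun M j => mset M 1 j (.int (cInt (mget M 1 (j - 1)) + 1))) M

def innerFold (i k : Nat) (M : List (List Cell)) : List (List Cell) :=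
  (List.range' 2 k).foldl
    (fun M j =>
      let cout : Int := if mget M i 0 = mget M 0 j then 0 else 1
      mset M i j (.int (min (min (cInt (mget M (i - 1) (j - 1)) + cout)
                                 (cInt (mget M i (j - 1)) + 1))
                            (cInt (mget M (i - 1) j) + 1)))) M

def outerFold (tlen k : Nat) (M : List (List Cell)) : List (List Cell) :=
  (List.range' 2 k).foldl (fun M i => innerFold i tlen M) M

theorem Levenshtein_unfold (a b : String) :
    Levenshtein a b =
      outerFold b.toList.length a.toList.length
        (row1Fold b.toList.length
          (col1Fold a.toList.length
            (rowFold b.toList b.toList.length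
              (colFold a.toList a.toList.length
                (mset (mset (mset (List.replicate (a.toList.length + 2)
                    (List.replicate (b.toList.length + 2) (Cell.int 0)))
                  0 0 (.str "*")) 1 0 (.str "|")) 0 1 (.str "__")))))) := rfl
theorem colFold_succ (s : List Char) (k : Nat) (M : List (List Cell)) :
    colFold s (k + 1) M =
      mset (colFold s k M) (2 + k) 0 (.str (String.ofList [s.getD (2 + k - 2) ' '])) := by
  unfold colFold; rw [List.range'_concat]; simp [List.foldl_append]

theorem colFold_facts (s : List Char) (m n k : Nat) (hk : k ≤ s.length) (hm : m = s.length + 2)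
    (hn : 0 < n) (M : List (List Cell)) (hS : Shape M m n) :
    Shape (colFold s k M) m n ∧
    (∀ i j, j ≠ 0 ∨ i < 2 ∨ 2 + k ≤ i → mget (colFold s k M) i j = mget M i j) ∧
    (∀ i, 2 ≤ i → i < 2 + k → mget (colFold s k M) i 0 = .str (String.ofList [s.getD (i - 2) ' '])) := by
  induction k with
  | zero => exact ⟨hS, fun i j _ => rfl, fun i hi1 hi2 => absurd hi2 (by omega)⟩
  | succ k ih =>
    obtain ⟨S1, U1, N1⟩ := ih (by omega)
    rw [colFold_succ]
    refine ⟨shape_mset _ _ _ _ _ _ S1, ?_, ?_⟩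
    · intro i j hc
      rw [mget_mset_ne _ _ _ _ _ _ (by omega), U1 i j (by omega)]
    · intro i hi1 hi2
      by_cases hie : i = 2 + k
      · subst hie
        rw [mget_mset_self _ _ _ _ _ _ S1 (by omega) (by omega)]
      · rw [mget_mset_ne _ _ _ _ _ _ (Or.inl hie)]
        exact N1 i hi1 (by omega)
theorem rowFold_succ (t : List Char) (k : Nat) (M : List (List Cell)) :
    rowFold t (k + 1) M =
      mset (rowFold t k M) 0 (2 + k) (.str (String.ofList [t.getD (2 + k - 2) ' '])) := by
  unfold rowFold; rw [List.range'_concat]; simp [List.foldl_append]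

theorem rowFold_facts (t : List Char) (m n k : Nat) (hk : k ≤ t.length) (hn : n = t.length + 2)
    (hm : 0 < m) (M : List (List Cell)) (hS : Shape M m n) :
    Shape (rowFold t k M) m n ∧
    (∀ i j, i ≠ 0 ∨ j < 2 ∨ 2 + k ≤ j → mget (rowFold t k M) i j = mget M i j) ∧
    (∀ j, 2 ≤ j → j < 2 + k → mget (rowFold t k M) 0 j = .str (String.ofList [t.getD (j - 2) ' '])) := by
  induction k with
  | zero => exact ⟨hS, fun i j _ => rfl, fun j hj1 hj2 => absurd hj2 (by omega)⟩
  | succ k ih =>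
    obtain ⟨S1, U1, N1⟩ := ih (by omega)
    rw [rowFold_succ]
    refine ⟨shape_mset _ _ _ _ _ _ S1, ?_, ?_⟩
    · intro i j hc
      rw [mget_mset_ne _ _ _ _ _ _ (by omega), U1 i j (by omega)]
    · intro j hj1 hj2
      by_cases hje : j = 2 + k
      · subst hje
        rw [mget_mset_self _ _ _ _ _ _ S1 (by omega) (by omega)]
      · rw [mget_mset_ne _ _ _ _ _ _ (Or.inr hje)]
        exact N1 j hj1 (by omega)

theorem col1Fold_succ (k : Nat) (M : List (List Cell)) :
    col1Fold (k + 1) M =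
      mset (col1Fold k M) (2 + k) 1 (.int (cInt (mget (col1Fold k M) (2 + k - 1) 1) + 1)) := by
  unfold col1Fold; rw [List.range'_concat]; simp [List.foldl_append]

theorem col1Fold_facts (s : List Char) (m n k : Nat) (hk : k ≤ s.length) (hm : m = s.length + 2)
    (hn : 2 ≤ n) (M : List (List Cell)) (hS : Shape M m n) (hbase : mget M 1 1 = .int 0) :
    Shape (col1Fold k M) m n ∧
    (∀ i j, j ≠ 1 ∨ i < 2 ∨ 2 + k ≤ i → mget (col1Fold k M) i j = mget M i j) ∧
    (∀ i, 1 ≤ i → i < 2 + k → mget (col1Fold k M) i 1 = .int ((i : Int) - 1)) := by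
  induction k with
  | zero =>
    refine ⟨hS, fun i j _ => rfl, fun i hi1 hi2 => ?_⟩
    have : i = 1 := by omega
    subst this
    show mget M 1 1 = _
    rw [hbase]; norm_num
  | succ k ih =>
    obtain ⟨S1, U1, N1⟩ := ih (by omega)
    rw [col1Fold_succ]
    have hprev : mget (col1Fold k M) (2 + k - 1) 1 = .int ((k : Int)) := by
      have := N1 (k + 1) (by omega) (by omega)
      have he : 2 + k - 1 = k + 1 := by omega
      rw [he, this]; congr 1; push_cast; ring
    refine ⟨shape_mset _ _ _ _ _ _ S1, ?_, ?_⟩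
    · intro i j hc
      rw [mget_mset_ne _ _ _ _ _ _ (by omega), U1 i j (by omega)]
    · intro i hi1 hi2
      by_cases hie : i = 2 + k
      · subst hie
        rw [mget_mset_self _ _ _ _ _ _ S1 (by omega) (by omega), hprev]
        simp [cInt]; ring
      · rw [mget_mset_ne _ _ _ _ _ _ (Or.inl hie)]
        exact N1 i hi1 (by omega)

theorem row1Fold_succ (k : Nat) (M : List (List Cell)) :
    row1Fold (k + 1) M =
      mset (row1Fold k M) 1 (2 + k) (.int (cInt (mget (row1Fold k M) 1 (2 + k - 1)) + 1)) := by
  unfold row1Fold; rw [List.range'_concat]; simp [List.foldl_append]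

theorem row1Fold_facts (t : List Char) (m n k : Nat) (hk : k ≤ t.length) (hn : n = t.length + 2)
    (hm : 2 ≤ m) (M : List (List Cell)) (hS : Shape M m n) (hbase : mget M 1 1 = .int 0) :
    Shape (row1Fold k M) m n ∧
    (∀ i j, i ≠ 1 ∨ j < 2 ∨ 2 + k ≤ j → mget (row1Fold k M) i j = mget M i j) ∧
    (∀ j, 1 ≤ j → j < 2 + k → mget (row1Fold k M) 1 j = .int ((j : Int) - 1)) := by
  induction k with
  | zero =>
    refine ⟨hS, fun i j _ => rfl, fun j hj1 hj2 => ?_⟩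
    have : j = 1 := by omega
    subst this
    show mget M 1 1 = _
    rw [hbase]; norm_num
  | succ k ih =>
    obtain ⟨S1, U1, N1⟩ := ih (by omega)
    rw [row1Fold_succ]
    have hprev : mget (row1Fold k M) 1 (2 + k - 1) = .int ((k : Int)) := by
      have := N1 (k + 1) (by omega) (by omega)
      have he : 2 + k - 1 = k + 1 := by omega
      rw [he, this]; congr 1; push_cast; ring
    refine ⟨shape_mset _ _ _ _ _ _ S1, ?_, ?_⟩
    · intro i j hc
      rw [mget_mset_ne _ _ _ _ _ _ (by omega), U1 i j (by omega)]
    · intro j hj1 hj2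
      by_cases hje : j = 2 + k
      · subst hje
        rw [mget_mset_self _ _ _ _ _ _ S1 (by omega) (by omega), hprev]
        simp [cInt]; ring
      · rw [mget_mset_ne _ _ _ _ _ _ (Or.inr hje)]
        exact N1 j hj1 (by omega)
theorem cell_str_eq_iff (c d : Char) :
    (Cell.str (String.ofList [c]) = Cell.str (String.ofList [d])) = (c = d) := by
  simp only [Cell.str.injEq, eq_iff_iff]
  constructor
  · intro h
    have := congrArg String.toList h
    simpa using this
  · rintro rfl; rfl

theorem innerFold_succ (i k : Nat) (M : List (List Cell)) :
    innerFold i (k + 1) M =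
      (let P := innerFold i k M
       let cout : Int := if mget P i 0 = mget P 0 (2 + k) then 0 else 1
       mset P i (2 + k) (.int (min (min (cInt (mget P (i - 1) (2 + k - 1)) + cout)
                                       (cInt (mget P i (2 + k - 1)) + 1))
                                   (cInt (mget P (i - 1) (2 + k)) + 1)))) := by
  unfold innerFold; rw [List.range'_concat]; simp [List.foldl_append]

theorem innerFold_facts (s t : List Char) (i0 : Nat) (hi0 : 2 ≤ i0) (hi0m : i0 < s.length + 2)
    (k : Nat) (hk : k ≤ t.length) (M : List (List Cell))
    (hS : Shape M (s.length + 2) (t.length + 2))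
    (hCol : ∀ i, 2 ≤ i → i < s.length + 2 → mget M i 0 = .str (String.ofList [s.getD (i - 2) ' ']))
    (hRow : ∀ j, 2 ≤ j → j < t.length + 2 → mget M 0 j = .str (String.ofList [t.getD (j - 2) ' ']))
    (hDP : ∀ i j, 1 ≤ i → i < s.length + 2 → 1 ≤ j → j < t.length + 2 →
      (j = 1 ∨ i = 1 ∨ i < i0) → mget M i j = .int (edN s t (i - 1) (j - 1))) :
    Shape (innerFold i0 k M) (s.length + 2) (t.length + 2) ∧
    (∀ i j, i ≠ i0 ∨ j < 2 ∨ 2 + k ≤ j → mget (innerFold i0 k M) i j = mget M i j) ∧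
    (∀ i j, 1 ≤ i → i < s.length + 2 → 1 ≤ j → j < t.length + 2 →
      (j = 1 ∨ i = 1 ∨ i < i0 ∨ (i = i0 ∧ j < 2 + k)) →
      mget (innerFold i0 k M) i j = .int (edN s t (i - 1) (j - 1))) := by
  induction k with
  | zero =>
    exact ⟨hS, fun i j _ => rfl, fun i j h1 h2 h3 h4 h5 => hDP i j h1 h2 h3 h4 (by omega)⟩
  | succ k ih =>
    obtain ⟨S1, U1, N1⟩ := ih (by omega)
    rw [innerFold_succ]
    simp only []
    refine ⟨shape_mset _ _ _ _ _ _ S1, ?_, ?_⟩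
    · intro i j hc
      rw [mget_mset_ne _ _ _ _ _ _ (by omega), U1 i j (by omega)]
    · intro i j h1 h2 h3 h4 h5
      by_cases hij : i = i0 ∧ j = 2 + k
      · obtain ⟨rfl, rfl⟩ := hij
        rw [mget_mset_self _ _ _ _ _ _ S1 (by omega) (by omega)]
        -- evaluate the three neighbour reads and the two header reads
        have hc0 : mget (innerFold i k M) i 0 = .str (String.ofList [s.getD (i - 2) ' ']) := by
          rw [U1 i 0 (by omega)]; exact hCol i hi0 hi0m
        have hr0 : mget (innerFold i k M) 0 (2 + k) = .str (String.ofList [t.getD (2 + k - 2) ' ']) := by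
          rw [U1 0 (2 + k) (by omega)]; exact hRow (2 + k) (by omega) (by omega)
        have hd : mget (innerFold i k M) (i - 1) (2 + k - 1) = .int (edN s t (i - 2) (k)) := by
          rw [N1 (i - 1) (2 + k - 1) (by omega) (by omega) (by omega) (by omega) (by omega)]
          congr 2
          all_goals omega
        have hl : mget (innerFold i k M) i (2 + k - 1) = .int (edN s t (i - 1) (k)) := by
          rw [N1 i (2 + k - 1) (by omega) (by omega) (by omega) (by omega) (by omega)]
          congr 2; omega
        have hu : mget (innerFold i k M) (i - 1) (2 + k) = .int (edN s t (i - 2) (k + 1)) := by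
          rw [N1 (i - 1) (2 + k) (by omega) (by omega) (by omega) (by omega) (by omega)]
          congr 2
          all_goals omega
        rw [hc0, hr0, hd, hl, hu]
        simp only [cell_str_eq_iff]
        obtain ⟨i', rfl⟩ : ∃ i', i = i' + 2 := ⟨i - 2, by omega⟩
        have e1 : i' + 2 - 1 = i' + 1 := by omega
        have e2 : i' + 2 - 2 = i' := by omega
        have e3 : 2 + k - 1 = k + 1 := by omega
        have e4 : 2 + k - 2 = k := by omega
        rw [e1, e2, e3, e4]
        simp only [cInt]
        conv_rhs => rw [show edN s t (i' + 1) (k + 1) =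
          (let c : Int := if s.getD i' ' ' = t.getD k ' ' then 0 else 1
           min (min (edN s t i' k + c) (edN s t i' (k + 1) + 1)) (edN s t (i' + 1) k + 1)) from by rw [edN]]
        simp only []
        split_ifs
        · congr 1; omega
        · congr 1; omega
      · rw [mget_mset_ne _ _ _ _ _ _ (by omega)]
        exact N1 i j h1 h2 h3 h4 (by omega)

theorem outerFold_facts (s t : List Char) (k : Nat) (hk : k ≤ s.length) (M : List (List Cell))
    (hS : Shape M (s.length + 2) (t.length + 2))
    (hCol : ∀ i, 2 ≤ i → i < s.length + 2 → mget M i 0 = .str (String.ofList [s.getD (i - 2) ' ']))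
    (hRow : ∀ j, 2 ≤ j → j < t.length + 2 → mget M 0 j = .str (String.ofList [t.getD (j - 2) ' ']))
    (hDP : ∀ i j, 1 ≤ i → i < s.length + 2 → 1 ≤ j → j < t.length + 2 →
      (j = 1 ∨ i = 1) → mget M i j = .int (edN s t (i - 1) (j - 1))) :
    Shape (outerFold t.length k M) (s.length + 2) (t.length + 2) ∧
    (∀ i, 2 ≤ i → i < s.length + 2 → mget (outerFold t.length k M) i 0 = .str (String.ofList [s.getD (i - 2) ' '])) ∧
    (∀ j, 2 ≤ j → j < t.length + 2 → mget (outerFold t.length k M) 0 j = .str (String.ofList [t.getD (j - 2) ' '])) ∧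
    (∀ i j, 1 ≤ i → i < s.length + 2 → 1 ≤ j → j < t.length + 2 →
      (j = 1 ∨ i = 1 ∨ i < 2 + k) → mget (outerFold t.length k M) i j = .int (edN s t (i - 1) (j - 1))) := by
  induction k with
  | zero =>
    exact ⟨hS, hCol, hRow, fun i j h1 h2 h3 h4 h5 => hDP i j h1 h2 h3 h4 (by omega)⟩
  | succ k ih =>
    obtain ⟨S1, C1, R1, D1⟩ := ih (by omega)
    have hstep : outerFold t.length (k + 1) M = innerFold (2 + k) t.length (outerFold t.length k M) := by
      unfold outerFold; rw [List.range'_concat]; simp [List.foldl_append]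
    rw [hstep]
    obtain ⟨S2, U2, N2⟩ := innerFold_facts s t (2 + k) (by omega) (by omega) t.length (le_refl _)
      (outerFold t.length k M) S1 C1 R1
      (fun i j h1 h2 h3 h4 h5 => D1 i j h1 h2 h3 h4 (by omega))
    refine ⟨S2, ?_, ?_, ?_⟩
    · intro i h1 h2; rw [U2 i 0 (by omega)]; exact C1 i h1 h2
    · intro j h1 h2; rw [U2 0 j (by omega)]; exact R1 j h1 h2
    · intro i j h1 h2 h3 h4 h5
      exact N2 i j h1 h2 h3 h4 (by omega)
theorem Lev_facts (a b : String) :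
    (Levenshtein a b).length = a.toList.length + 2 ∧
    ((Levenshtein a b).getD 0 []).length = b.toList.length + 2 ∧
    mget (Levenshtein a b) (a.toList.length + 1) (b.toList.length + 1)
      = .int (edN a.toList b.toList a.toList.length b.toList.length) := by
  rw [Levenshtein_unfold]
  set M3 : List (List Cell) := mset (mset (mset (List.replicate (a.toList.length + 2)
      (List.replicate (b.toList.length + 2) (Cell.int 0))) 0 0 (.str "*")) 1 0 (.str "|"))
      0 1 (.str "__") with hM3
  set M4 : List (List Cell) := colFold a.toList a.toList.length M3 with hM4
  set M5 : List (List Cell) := rowFold b.toList b.toList.length M4 with hM5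
  set M6 : List (List Cell) := col1Fold a.toList.length M5 with hM6
  set M7 : List (List Cell) := row1Fold b.toList.length M6 with hM7
  have hS0 := shape_M0 (a.toList.length + 2) (b.toList.length + 2)
  have hS3 : Shape M3 (a.toList.length + 2) (b.toList.length + 2) := by
    rw [hM3]
    exact shape_mset _ _ _ _ _ _ (shape_mset _ _ _ _ _ _ (shape_mset _ _ _ _ _ _ hS0))
  have h11 : mget M3 1 1 = .int 0 := by
    rw [hM3]
    rw [mget_mset_ne _ _ _ _ _ _ (by omega)]
    rw [mget_mset_ne _ _ _ _ _ _ (by omega)]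
    rw [mget_mset_ne _ _ _ _ _ _ (by omega)]
    exact mget_M0 _ _ _ _
  obtain ⟨S4, U4, N4⟩ := colFold_facts a.toList (a.toList.length + 2) (b.toList.length + 2)
    a.toList.length (le_refl _) rfl (by omega) M3 hS3
  obtain ⟨S5, U5, N5⟩ := rowFold_facts b.toList (a.toList.length + 2) (b.toList.length + 2)
    b.toList.length (le_refl _) rfl (by omega) M4 S4
  have base5 : mget M5 1 1 = .int 0 := by
    rw [hM5, U5 1 1 (by omega), hM4, U4 1 1 (by omega)]
    exact h11
  obtain ⟨S6, U6, N6⟩ := col1Fold_facts a.toList (a.toList.length + 2) (b.toList.length + 2)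
    a.toList.length (le_refl _) rfl (by omega) M5 S5 base5
  have base6 : mget M6 1 1 = .int 0 := by
    rw [hM6, U6 1 1 (by omega)]; exact base5
  obtain ⟨S7, U7, N7⟩ := row1Fold_facts b.toList (a.toList.length + 2) (b.toList.length + 2)
    b.toList.length (le_refl _) rfl (by omega) M6 S6 base6
  have hCol7 : ∀ i, 2 ≤ i → i < a.toList.length + 2 →
      mget M7 i 0 = .str (String.ofList [a.toList.getD (i - 2) ' ']) := by
    intro i h1 h2
    rw [hM7, U7 i 0 (by omega), hM6, U6 i 0 (by omega), hM5, U5 i 0 (by omega), hM4]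
    exact N4 i h1 (by omega)
  have hRow7 : ∀ j, 2 ≤ j → j < b.toList.length + 2 →
      mget M7 0 j = .str (String.ofList [b.toList.getD (j - 2) ' ']) := by
    intro j h1 h2
    rw [hM7, U7 0 j (by omega), hM6, U6 0 j (by omega), hM5]
    exact N5 j h1 (by omega)
  have hDP7 : ∀ i j, 1 ≤ i → i < a.toList.length + 2 → 1 ≤ j → j < b.toList.length + 2 →
      (j = 1 ∨ i = 1) → mget M7 i j = .int (edN a.toList b.toList (i - 1) (j - 1)) := by
    intro i j h1 h2 h3 h4 h5
    rcases h5 with rfl | rfl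
    · rw [hM7, U7 i 1 (by omega), hM6, N6 i (by omega) (by omega)]
      rw [show (1 : Nat) - 1 = 0 from rfl, edN_right_zero]
      congr 1; omega
    · rw [hM7, N7 j (by omega) (by omega)]
      rw [show (1 : Nat) - 1 = 0 from rfl, edN_left_zero]
      congr 1; omega
  obtain ⟨S8, C8, R8, D8⟩ := outerFold_facts a.toList b.toList a.toList.length (le_refl _)
    M7 S7 hCol7 hRow7 hDP7
  refine ⟨S8.1, S8.2 0 (by omega), ?_⟩
  have := D8 (a.toList.length + 1) (b.toList.length + 1) (by omega) (by omega) (by omega) (by omega) (by omega)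
  rw [this]
  congr 2
theorem editdist_eq (a b : String) :
    editdist a b = edN a.toList b.toList a.toList.length b.toList.length := by
  unfold editdist
  exact (edGo_correct a.toList b.toList (a.toList.length + b.toList.length)
    a.toList.length b.toList.length (le_refl _) _ (goodMemo_empty _ _)).1

theorem lev_cell_eq (a b : String) :
    cInt (mget (Levenshtein a b) ((Levenshtein a b).length - 1)
      (((Levenshtein a b).getD 0 []).length - 1)) = editdist a b := by
  obtain ⟨h1, h2, h3⟩ := Lev_facts a b
  rw [h1, h2, editdist_eq]
  have e1 : a.toList.length + 2 - 1 = a.toList.length + 1 := by omega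
  have e2 : b.toList.length + 2 - 1 = b.toList.length + 1 := by omega
  rw [e1, e2, h3]; rfl

theorem range_fold_skip0 (f : String → Int) (l0 : String) (rest : List String) :
    ∀ acc : Int,
      (List.range (l0 :: rest).length).foldl
        (fun acc j => if 0 ≠ j then acc + f ((l0 :: rest).getD j "") else acc) acc
        = rest.foldl (fun acc b => acc + f b) acc := by
  intro acc
  rw [List.length_cons, List.range_succ_eq_map, List.foldl_cons, List.foldl_map]
  simp only [if_neg (by omega : ¬ (0 ≠ 0))]
  have : ∀ (r : List String) (acc : Int),
      (List.range r.length).foldl (fun acc j => if 0 ≠ Nat.succ j then acc + f ((l0 :: r).getD (Nat.succ j) "") else acc) acc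
        = r.foldl (fun acc b => acc + f b) acc := by
    intro r
    induction r with
    | nil => intro acc; rfl
    | cons x xs ih =>
      intro acc
      rw [List.length_cons, List.range_succ_eq_map, List.foldl_cons, List.foldl_map]
      simp only [List.getD_cons_succ]
      rw [show ((if 0 ≠ Nat.succ 0 then acc + f ((x :: xs).getD 0 "") else acc)) = acc + f x from by simp]
      rw [List.foldl_cons]
      exact ih (acc + f x)
  exact this rest acc

-- ===== VERDICT (by name: the statement is the Claim_ definition above) =====
theorem evaluation_func_spec : Claim_equal_evaluation_func := by
  unfold Claim_equal_evaluation_func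
  intro lines _
  unfold Spec_evaluation_func
  cases lines with
  | nil => rfl
  | cons l0 rest =>
    unfold evaluation_func evaluation_func_alt
    rw [if_neg (by simp)]
    simp only [List.getD_cons_zero]
    rw [range_fold_skip0 (fun b => cInt (mget (Levenshtein l0 b) ((Levenshtein l0 b).length - 1)
      (((Levenshtein l0 b).getD 0 []).length - 1))) l0 rest 0]
    have hfg : (fun (acc : Int) (b : String) => acc + cInt (mget (Levenshtein l0 b) ((Levenshtein l0 b).length - 1)
        (((Levenshtein l0 b).getD 0 []).length - 1))) = fun acc b => acc + editdist l0 b := by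
      funext acc b; rw [lev_cell_eq]
    rw [hfg]
    congr 1
    ring
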